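-- pv_equiv track=rewrite | github.com/Nicolas669/projet_logique | generateurs.py | gen_pigeons
-- ===== SOURCE A (Python) =====
-- def gen_pigeons(n):
--     CL=[]
--     LC=[[]]*(2*n*(n+1))
--     compte=0
--     for i in range (1,n+2):
--         C=[]
--         p=2*(i-1)*n+1
--         while p<2*n*i+1:
--             C+=[p]
--             p+=2
--
--         CL+=[C]
--         compte+=1
--         for l in C:
--             LC[l-1]=LC[l-1]+[compte]
--         for a in range (1,n):
--             for b in range (a+1,n+1):
--                 D=[2*((i-1)*n+a),2*((i-1)*n+b)]
--                 CL+=[D]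
--                 compte+=1
--                 for l in D:
--                     LC[l - 1] = LC[l - 1] + [compte]
--     for j in range (1,n+1):
--         for a in range (1,n+1):
--             for b in range (a+1,n+2):
--                 E=[(a-1)*n+2*j,(b-1)*n+2*j]
--                 CL+=[E]
--                 compte+=1
--                 for l in E:
--                     LC[l - 1] = LC[l - 1] + [compte]
--     return(CL,LC)
-- ===== SOURCE B (Python) =====
-- def gen_pigeons(n):
--     # Build the clause list declaratively (comprehensions), without any counter.
--     CL = [c
--           for i in range(1, n + 2)
--           for c in [list(range(2 * (i - 1) * n + 1, 2 * n * i + 1, 2))]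
--                  + [[2 * ((i - 1) * n + a), 2 * ((i - 1) * n + b)]
--                     for a in range(1, n) for b in range(a + 1, n + 1)]] \
--          + [[(a - 1) * n + 2 * j, (b - 1) * n + 2 * j]
--             for j in range(1, n + 1) for a in range(1, n + 1) for b in range(a + 1, n + 2)]
--     # Occurrence index by sort-and-group: flatten (literal, clause#) events,
--     # sort them, then cut the sorted stream into one group per literal.
--     pairs = sorted((l, idx) for idx, c in enumerate(CL, 1) for l in c)
--     m = len(pairs)
--     LC = [[]] * (2 * n * (n + 1))
--     k = 0
--     while k < m:
--         l = pairs[k][0]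
--         occ = []
--         while k < m and pairs[k][0] == l:
--             occ.append(pairs[k][1])
--             k += 1
--         LC[l - 1] = occ
--     return (CL, LC)
-- ===== Notes on version B (the rewrite author's own statement) =====
-- stated objective: alternative
-- what changed: A interleaves clause emission with in-place literal-occurrence bookkeeping driven by a running counter (and builds the first clause with a manual while loop); B builds the clause list declaratively by comprehensions, then derives the occurrence index by a sort-and-group pass: it flattens (literal, clause#) events, sorts them, and cuts the sorted stream into one group per literal. Pre_ excludes only the n where A's initial [[]]*(2*n*(n+1)) raises OverflowError (length above sys.maxsize); A never returns a value there.
import Mathlib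
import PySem

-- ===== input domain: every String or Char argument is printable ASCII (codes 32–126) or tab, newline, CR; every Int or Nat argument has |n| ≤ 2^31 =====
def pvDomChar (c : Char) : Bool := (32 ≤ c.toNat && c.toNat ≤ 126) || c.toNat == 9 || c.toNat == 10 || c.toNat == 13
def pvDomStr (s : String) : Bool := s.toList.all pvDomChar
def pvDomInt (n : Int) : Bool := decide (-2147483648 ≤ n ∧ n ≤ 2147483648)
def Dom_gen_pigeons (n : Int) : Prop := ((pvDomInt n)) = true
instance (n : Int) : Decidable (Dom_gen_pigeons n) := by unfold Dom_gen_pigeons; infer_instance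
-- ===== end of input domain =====

-- B builds the clause list by comprehensions and derives the occurrence index by a
-- sort-and-group pass over (literal, clause#) events, where A interleaves clause emission
-- with in-place index updates driven by a running counter; same return value.

-- ===== PORT A =====
-- 'for l in C: LC[l-1] = LC[l-1] + [compte]'.  pyGetD/pySetD are exact here: every literal l of a
-- generated clause satisfies 1 ≤ l ≤ 2n(n+1), so the Python indexing never raises.
def pvOccUpd (LC : List (List Int)) (C : List Int) (compte : Int) : List (List Int) :=
  C.foldl (fun LC l =>
    PySem.List.pySetD LC (l - 1) (PySem.List.pyGetD LC (l - 1) [] ++ [compte])) LC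

-- the repeated statement group 'CL += [c]; compte += 1; for l in c: LC[l-1] = LC[l-1] + [compte]'
def pvPush (s : List (List Int) × List (List Int) × Int) (c : List Int) :
    List (List Int) × List (List Int) × Int :=
  (s.1 ++ [c], pvOccUpd s.2.1 c (s.2.2 + 1), s.2.2 + 1)

-- 'C=[]; p=2*(i-1)*n+1; while p<2*n*i+1: C+=[p]; p+=2'
def pvWhileC (p stop : Int) (C : List Int) : List Int :=
  if p < stop then pvWhileC (p + 2) stop (C ++ [p]) else C
termination_by (stop - p).toNat
decreasing_by omega

-- body of the 'for i in range(1, n+2)' loop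
def pvStepI (n : Int) (s : List (List Int) × List (List Int) × Int) (i : Int) :
    List (List Int) × List (List Int) × Int :=
  let C := pvWhileC (2 * (i - 1) * n + 1) (2 * n * i + 1) []
  let s := pvPush s C
  (PySem.List.pyRange 1 n 1).foldl (fun s a =>
    (PySem.List.pyRange (a + 1) (n + 1) 1).foldl (fun s b =>
      pvPush s [2 * ((i - 1) * n + a), 2 * ((i - 1) * n + b)]) s) s

-- body of the 'for j in range(1, n+1)' loop
def pvStepJ (n : Int) (s : List (List Int) × List (List Int) × Int) (j : Int) :
    List (List Int) × List (List Int) × Int :=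
  (PySem.List.pyRange 1 (n + 1) 1).foldl (fun s a =>
    (PySem.List.pyRange (a + 1) (n + 2) 1).foldl (fun s b =>
      pvPush s [(a - 1) * n + 2 * j, (b - 1) * n + 2 * j]) s) s

def gen_pigeons (n : Int) : List (List Int) × List (List Int) :=
  let s0 : List (List Int) × List (List Int) × Int :=
    ([], List.replicate (2 * n * (n + 1)).toNat [], 0)
  let s1 := (PySem.List.pyRange 1 (n + 2) 1).foldl (pvStepI n) s0
  let s2 := (PySem.List.pyRange 1 (n + 1) 1).foldl (pvStepJ n) s1
  (s2.1, s2.2.1)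

-- ===== PORT B =====
-- the clause-list comprehension of Source B (first clause via list(range(start, stop, 2)))
def pvCL (n : Int) : List (List Int) :=
  (PySem.List.pyRange 1 (n + 2) 1).flatMap (fun i =>
    [PySem.List.pyRange (2 * (i - 1) * n + 1) (2 * n * i + 1) 2] ++
    (PySem.List.pyRange 1 n 1).flatMap (fun a =>
      (PySem.List.pyRange (a + 1) (n + 1) 1).map (fun b =>
        [2 * ((i - 1) * n + a), 2 * ((i - 1) * n + b)])))
  ++ (PySem.List.pyRange 1 (n + 1) 1).flatMap (fun j =>
    (PySem.List.pyRange 1 (n + 1) 1).flatMap (fun a =>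
      (PySem.List.pyRange (a + 1) (n + 2) 1).map (fun b =>
        [(a - 1) * n + 2 * j, (b - 1) * n + 2 * j])))

-- 'while k < m and pairs[k][0] == l: occ.append(pairs[k][1]); k += 1' (guard keeps pyGetD in range)
def pvGroup (pairs : List (Int × Int)) (m l : Int) (k : Int) (occ : List Int) :
    List Int × Int :=
  if h : k < m ∧ (PySem.List.pyGetD pairs k (0, 0)).1 = l then
    pvGroup pairs m l (k + 1) (occ ++ [(PySem.List.pyGetD pairs k (0, 0)).2])
  else (occ, k)
termination_by (m - k).toNat
decreasing_by omega

-- 'while k < m: l = pairs[k][0]; occ = []; <inner while>; LC[l-1] = occ'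
-- (fuel-guarded structural recursion; each pass consumes at least one event, so
--  fuel = number of events suffices — proved where the scan is characterised)
def pvScan (pairs : List (Int × Int)) (m : Int) :
    Nat → Int → List (List Int) → List (List Int)
  | 0, _, LC => LC
  | fuel + 1, k, LC =>
    if k < m then
      let l := (PySem.List.pyGetD pairs k (0, 0)).1
      let g := pvGroup pairs m l k []
      pvScan pairs m fuel g.2 (PySem.List.pySetD LC (l - 1) g.1)
    else LC

def gen_pigeons_alt (n : Int) : List (List Int) × List (List Int) :=
  let CL := pvCL n
  -- 'pairs = sorted((l, idx) for idx, c in enumerate(CL, 1) for l in c)' (tuple order = sorted2)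
  let pairs := PySem.List.sorted2
    ((PySem.List.enumerate CL 1).flatMap (fun p => p.2.map (fun l => (l, p.1))))
    Prod.fst Prod.snd
  let m : Int := pairs.length
  (CL, pvScan pairs m pairs.length 0 (List.replicate (2 * n * (n + 1)).toNat []))

-- ===== PRECONDITION & SPEC =====
-- Pre_ excludes exactly the n where A's first statement 'LC=[[]]*(2*n*(n+1))' raises OverflowError
-- (requested length above sys.maxsize = 2^63-1), so A never returns a value there.
def Pre_gen_pigeons (n : Int) : Prop := 2 * n * (n + 1) ≤ 9223372036854775807
instance (n : Int) : Decidable (Pre_gen_pigeons n) := by unfold Pre_gen_pigeons; infer_instance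
def pvWitness_gen_pigeons : Int := (3)

def Spec_gen_pigeons (n : Int) (out : List (List Int) × List (List Int)) : Prop := out = gen_pigeons_alt n
instance (n : Int) (out : List (List Int) × List (List Int)) : Decidable (Spec_gen_pigeons n out) := by unfold Spec_gen_pigeons; infer_instance

-- ===== CLAIM (what is proved, stated in full; the proofs are below) =====
def Claim_equal_gen_pigeons : Prop := ∀ (n : Int), Dom_gen_pigeons n → Pre_gen_pigeons n → Spec_gen_pigeons n (gen_pigeons n)

-- ===== LEMMAS AND PROOFS =====

-- ---- reconstruction of A's loop state from the clause list alone ----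

-- apply the occurrence updates of a clause list, numbering the clauses from k
def pvApp : List (List Int) → List (List Int) → Int → List (List Int)
  | LC, [], _ => LC
  | LC, c :: cs, k => pvApp (pvOccUpd LC c k) cs (k + 1)

def pvMk (LC0 : List (List Int)) (CL : List (List Int)) :
    List (List Int) × List (List Int) × Int :=
  (CL, pvApp LC0 CL 1, (CL.length : Int))

-- clause-only bodies of A's two outer loops (proof-side reconstructions)
def pvStepIB (n : Int) (CL : List (List Int)) (i : Int) : List (List Int) :=
  let CL := CL ++ [PySem.List.pyRange (2 * (i - 1) * n + 1) (2 * n * i + 1) 2]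
  (PySem.List.pyRange 1 n 1).foldl (fun CL a =>
    (PySem.List.pyRange (a + 1) (n + 1) 1).foldl (fun CL b =>
      CL ++ [[2 * ((i - 1) * n + a), 2 * ((i - 1) * n + b)]]) CL) CL

def pvStepJB (n : Int) (CL : List (List Int)) (j : Int) : List (List Int) :=
  (PySem.List.pyRange 1 (n + 1) 1).foldl (fun CL a =>
    (PySem.List.pyRange (a + 1) (n + 2) 1).foldl (fun CL b =>
      CL ++ [[(a - 1) * n + 2 * j, (b - 1) * n + 2 * j]]) CL) CL

def pvCLa (n : Int) : List (List Int) :=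
  (PySem.List.pyRange 1 (n + 1) 1).foldl (pvStepJB n)
    ((PySem.List.pyRange 1 (n + 2) 1).foldl (pvStepIB n) [])

lemma pvApp_snoc : ∀ (cs : List (List Int)) (LC : List (List Int)) (c : List Int) (k : Int),
    pvApp LC (cs ++ [c]) k = pvOccUpd (pvApp LC cs k) c (k + cs.length) := by
  intro cs
  induction cs with
  | nil => intro LC c k; simp [pvApp]
  | cons d cs ih =>
    intro LC c k
    simp only [List.cons_append, pvApp, ih, List.length_cons]
    congr 1
    push_cast
    ring

lemma pvPush_mk (LC0 CL : List (List Int)) (c : List Int) :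
    pvPush (pvMk LC0 CL) c = pvMk LC0 (CL ++ [c]) := by
  unfold pvPush pvMk
  rw [pvApp_snoc]
  simp only [Prod.mk.injEq, List.length_append, List.length_cons, List.length_nil]
  refine ⟨by simp, by congr 1; ring, by push_cast; ring⟩

lemma pvFold_mk {α : Type} (LC0 : List (List Int)) (L : List α)
    (fA : List (List Int) × List (List Int) × Int → α → List (List Int) × List (List Int) × Int)
    (fB : List (List Int) → α → List (List Int))
    (h : ∀ CL x, fA (pvMk LC0 CL) x = pvMk LC0 (fB CL x)) :
    ∀ CL, L.foldl fA (pvMk LC0 CL) = pvMk LC0 (L.foldl fB CL) := by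
  induction L with
  | nil => intro CL; rfl
  | cons x L ih => intro CL; rw [List.foldl_cons, h, List.foldl_cons, ih]

lemma pvRange2_nil (p stop : Int) (h : stop ≤ p) : PySem.List.pyRange p stop 2 = [] := by
  rw [PySem.List.pyRange_of_pos _ _ (by norm_num)]
  rw [if_neg (by omega)]
  simp

lemma pvRange2_cons (p stop : Int) (h : p < stop) :
    PySem.List.pyRange p stop 2 = p :: PySem.List.pyRange (p + 2) stop 2 := by
  rw [PySem.List.pyRange_of_pos _ _ (by norm_num), PySem.List.pyRange_of_pos _ _ (by norm_num)]
  have hcount : (if p < stop then ((stop - p + 2 - 1) / 2).toNat else 0)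
      = (if p + 2 < stop then ((stop - (p + 2) + 2 - 1) / 2).toNat else 0) + 1 := by
    split_ifs <;> omega
  rw [hcount, List.range_succ_eq_map]
  simp only [List.map_cons, List.map_map]
  congr 1
  · norm_num
  · exact List.map_congr_left (fun k _ => by simp [Function.comp]; ring)

lemma pvWhileC_eq (p stop : Int) (C : List Int) :
    pvWhileC p stop C = C ++ PySem.List.pyRange p stop 2 := by
  fun_induction pvWhileC p stop C with
  | case1 p C h ih =>
    rw [pvRange2_cons _ _ h] at *
    simp_all
  | case2 p C h =>
    rw [pvRange2_nil _ _ (by omega)]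
    simp

lemma pvStepI_mk (n : Int) (LC0 : List (List Int)) (CL : List (List Int)) (i : Int) :
    pvStepI n (pvMk LC0 CL) i = pvMk LC0 (pvStepIB n CL i) := by
  simp only [pvStepI, pvStepIB, pvWhileC_eq, List.nil_append, pvPush_mk]
  apply pvFold_mk
  intro CL a
  apply pvFold_mk
  intro CL b
  exact pvPush_mk LC0 CL _

lemma pvStepJ_mk (n : Int) (LC0 : List (List Int)) (CL : List (List Int)) (j : Int) :
    pvStepJ n (pvMk LC0 CL) j = pvMk LC0 (pvStepJB n CL j) := by
  unfold pvStepJ pvStepJB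
  apply pvFold_mk
  intro CL a
  apply pvFold_mk
  intro CL b
  exact pvPush_mk LC0 CL _

lemma pvA_eq (n : Int) :
    gen_pigeons n
      = (pvCLa n, pvApp (List.replicate (2 * n * (n + 1)).toNat []) (pvCLa n) 1) := by
  simp only [gen_pigeons, pvCLa]
  have h0 : (([], List.replicate (2 * n * (n + 1)).toNat [], 0) :
      List (List Int) × List (List Int) × Int)
      = pvMk (List.replicate (2 * n * (n + 1)).toNat []) [] := rfl
  rw [h0,
    pvFold_mk _ _ _ _ (fun CL i => pvStepI_mk n _ CL i) [],
    pvFold_mk _ _ _ _ (fun CL j => pvStepJ_mk n _ CL j) _]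
  rfl

-- A builds the clause list by repeated appends; flattened, that is B's comprehension.
lemma pvCLa_eq (n : Int) : pvCLa n = pvCL n := by
  have hI : pvStepIB n = fun CL i => CL ++
      ([PySem.List.pyRange (2 * (i - 1) * n + 1) (2 * n * i + 1) 2] ++
        (PySem.List.pyRange 1 n 1).flatMap (fun a =>
          (PySem.List.pyRange (a + 1) (n + 1) 1).map (fun b =>
            [2 * ((i - 1) * n + a), 2 * ((i - 1) * n + b)]))) := by
    funext CL i
    simp only [pvStepIB, PySem.List.foldl_append_singleton_eq_map,
      PySem.List.foldl_append_eq_flatMap, List.append_assoc]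
  have hJ : pvStepJB n = fun CL j => CL ++
      (PySem.List.pyRange 1 (n + 1) 1).flatMap (fun a =>
        (PySem.List.pyRange (a + 1) (n + 2) 1).map (fun b =>
          [(a - 1) * n + 2 * j, (b - 1) * n + 2 * j])) := by
    funext CL j
    simp only [pvStepJB, PySem.List.foldl_append_singleton_eq_map,
      PySem.List.foldl_append_eq_flatMap]
  rw [pvCLa, hI, hJ, PySem.List.foldl_append_eq_flatMap,
    PySem.List.foldl_append_eq_flatMap, List.nil_append, pvCL]

-- ---- the occurrence index both sides compute, as a function of the clause list ----

-- occurrences of literal l among clauses numbered from k (multiplicity-exact)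
def pvSocc (CL : List (List Int)) (k l : Int) : List Int :=
  (PySem.List.enumerate CL k).flatMap
    (fun p => (p.2.filter (fun x => decide (x = l))).map (fun _ => p.1))

def pvPairs (CL : List (List Int)) : List (Int × Int) :=
  (PySem.List.enumerate CL 1).flatMap (fun p => p.2.map (fun l => (l, p.1)))

def pvBlocks (CL : List (List Int)) (M : Int) : List (Int × Int) :=
  (PySem.List.pyRange 1 (M + 1) 1).flatMap
    (fun l => (pvSocc CL 1 l).map (fun i => (l, i)))

def pvLexLt (p q : Int × Int) : Prop := p.1 < q.1 ∨ (p.1 = q.1 ∧ p.2 < q.2)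
def pvLexLe (p q : Int × Int) : Prop := p.1 < q.1 ∨ (p.1 = q.1 ∧ p.2 ≤ q.2)

-- ---- A's side: pvApp over an all-empty table computes pvSocc pointwise ----

lemma pvOccUpd_length (c : List Int) : ∀ (LC : List (List Int)) (kc : Int),
    (pvOccUpd LC c kc).length = LC.length := by
  induction c with
  | nil => intro LC kc; rfl
  | cons x c ih =>
    intro LC kc
    simp only [pvOccUpd, List.foldl_cons] at *
    rw [ih, PySem.List.length_pySetD]

lemma pvApp_length (CL : List (List Int)) : ∀ (LC : List (List Int)) (k : Int),
    (pvApp LC CL k).length = LC.length := by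
  induction CL with
  | nil => intro LC k; rfl
  | cons c cs ih =>
    intro LC k
    rw [pvApp, ih, pvOccUpd_length]

lemma pvOccUpd_getD (c : List Int) : ∀ (LC : List (List Int)) (kc : Int) (t : Nat),
    (∀ x ∈ c, 1 ≤ x ∧ x ≤ (LC.length : Int)) → t < LC.length →
    (pvOccUpd LC c kc).getD t []
      = LC.getD t [] ++ (c.filter (fun x => decide (x = (t : Int) + 1))).map (fun _ => kc) := by
  induction c with
  | nil => intro LC kc t _ _; simp [pvOccUpd]
  | cons x c ih =>
    intro LC kc t hb ht
    have hx := hb x (List.mem_cons_self)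
    have hx0 : (0 : Int) ≤ x - 1 := by omega
    have hx1 : x - 1 < (LC.length : Int) := by omega
    have hstep : pvOccUpd LC (x :: c) kc
        = pvOccUpd (LC.set (x - 1).toNat (LC[(x - 1).toNat]'(by omega) ++ [kc])) c kc := by
      simp only [pvOccUpd, List.foldl_cons]
      rw [PySem.List.pySetD_of_nonneg _ _ hx0, PySem.List.pyGetD_eq_getElem _ _ hx0 hx1]
    rw [hstep, ih _ kc t (fun y hy => by
        have := hb y (List.mem_cons_of_mem _ hy); simpa using this) (by simpa using ht)]
    by_cases hxt : x = (t : Int) + 1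
    · have hidx : (x - 1).toNat = t := by omega
      rw [List.filter_cons_of_pos (by simpa using hxt)]
      rw [List.getD_eq_getElem _ _ (by simpa using ht), List.getElem_set, if_pos hidx,
        List.getD_eq_getElem _ _ ht]
      simp only [List.map_cons, List.append_assoc, List.singleton_append]
      congr 2
    · have hidx : (x - 1).toNat ≠ t := by omega
      rw [List.filter_cons_of_neg (by simpa using hxt)]
      rw [List.getD_eq_getElem _ _ (by simpa using ht), List.getElem_set, if_neg hidx,
        List.getD_eq_getElem _ _ ht]

lemma pvApp_getD (CL : List (List Int)) : ∀ (LC : List (List Int)) (k : Int) (t : Nat),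
    (∀ c ∈ CL, ∀ x ∈ c, 1 ≤ x ∧ x ≤ (LC.length : Int)) → t < LC.length →
    (pvApp LC CL k).getD t [] = LC.getD t [] ++ pvSocc CL k ((t : Int) + 1) := by
  induction CL with
  | nil => intro LC k t _ _; simp [pvApp, pvSocc, PySem.List.enumerate_nil]
  | cons c cs ih =>
    intro LC k t hb ht
    rw [pvApp, ih _ (k + 1) t (fun d hd y hy => by
        have := hb d (List.mem_cons_of_mem _ hd) y hy
        rwa [pvOccUpd_length]) (by rwa [pvOccUpd_length]),
      pvOccUpd_getD c LC k t (hb c List.mem_cons_self) ht]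
    simp [pvSocc, PySem.List.enumerate_cons, List.append_assoc]

lemma pvApp_repl (CL : List (List Int)) (M : Int) (hM : 0 ≤ M)
    (hr : ∀ c ∈ CL, ∀ x ∈ c, 1 ≤ x ∧ x ≤ M) :
    pvApp (List.replicate M.toNat []) CL 1
      = (PySem.List.pyRange 1 (M + 1) 1).map (fun l => pvSocc CL 1 l) := by
  have hlen : (pvApp (List.replicate M.toNat []) CL 1).length = M.toNat := by
    rw [pvApp_length, List.length_replicate]
  have hlen2 : ((PySem.List.pyRange 1 (M + 1) 1).map (fun l => pvSocc CL 1 l)).length = M.toNat := by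
    rw [List.length_map, PySem.List.length_pyRange_one]
    omega
  apply List.ext_getElem (by rw [hlen, hlen2])
  intro t h1 h2
  have ht : t < M.toNat := by omega
  have hb : ∀ c ∈ CL, ∀ x ∈ c, 1 ≤ x ∧ x ≤ ((List.replicate M.toNat ([] : List Int)).length : Int) := by
    intro c hc x hx
    have := hr c hc x hx
    rw [List.length_replicate]
    omega
  rw [← List.getD_eq_getElem _ [] h1,
    pvApp_getD CL (List.replicate M.toNat []) 1 t hb (by rwa [List.length_replicate])]
  rw [List.getElem_map, PySem.List.getElem_pyRange_one]
  rw [List.getD_eq_getElem _ [] (by rwa [List.length_replicate]), List.getElem_replicate]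
  simp [add_comm]

-- ---- facts about B's clause list ----

lemma pvNodupRange2 (a b : Int) : (PySem.List.pyRange a b 2).Nodup := by
  rw [PySem.List.pyRange_of_pos _ _ (by norm_num)]
  exact List.Nodup.map (fun x y h => by omega) (List.nodup_range)

lemma pvCL_lit (n : Int) : ∀ c ∈ pvCL n, ∀ x ∈ c, 1 ≤ x ∧ x ≤ 2 * n * (n + 1) := by
  intro c hc x hx
  simp only [pvCL, List.mem_append, List.mem_flatMap, List.mem_cons, List.mem_map,
    PySem.List.mem_pyRange_one, List.not_mem_nil, or_false] at hc
  rcases hc with ⟨i, hi, hc⟩ | ⟨j, hj, a, ha, b, hb, hc⟩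
  · rcases hc with hc | ⟨a, ha, b, hb, hc⟩
    · subst hc
      rcases (PySem.List.mem_pyRange_iff_of_pos (by norm_num) x).mp hx with ⟨h1, h2, _⟩
      have p1 : 0 ≤ (i - 1) * n := mul_nonneg (by omega) (by omega)
      have p2 : 0 ≤ n * (n + 1 - i) := mul_nonneg (by omega) (by omega)
      constructor <;> nlinarith
    · subst hc
      have p1 : 0 ≤ (i - 1) * n := mul_nonneg (by omega) (by omega)
      have p2 : (i - 1) * n ≤ n * n := by nlinarith
      simp only [List.mem_cons, List.not_mem_nil, or_false] at hx
      rcases hx with rfl | rfl <;> constructor <;> nlinarith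
  · subst hc
    have p1 : 0 ≤ (a - 1) * n := mul_nonneg (by omega) (by omega)
    have p2 : (a - 1) * n ≤ n * n := by nlinarith
    have p3 : 0 ≤ (b - 1) * n := mul_nonneg (by omega) (by omega)
    have p4 : (b - 1) * n ≤ n * n := by nlinarith
    simp only [List.mem_cons, List.not_mem_nil, or_false] at hx
    rcases hx with rfl | rfl <;> constructor <;> nlinarith

lemma pvCL_nodup (n : Int) : ∀ c ∈ pvCL n, c.Nodup := by
  intro c hc
  simp only [pvCL, List.mem_append, List.mem_flatMap, List.mem_cons, List.mem_map,
    PySem.List.mem_pyRange_one, List.not_mem_nil, or_false] at hc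
  rcases hc with ⟨i, hi, hc⟩ | ⟨j, hj, a, ha, b, hb, hc⟩
  · rcases hc with hc | ⟨a, ha, b, hb, hc⟩
    · subst hc; exact pvNodupRange2 _ _
    · subst hc
      simp only [List.nodup_cons, List.mem_singleton, List.not_mem_nil, not_false_iff,
        and_true, List.nodup_nil]
      intro h
      have : a = b := by linarith
      omega
  · subst hc
    simp only [List.nodup_cons, List.mem_singleton, List.not_mem_nil, not_false_iff,
      and_true, List.nodup_nil]
    intro h
    have h1 : 1 * 1 ≤ (b - a) * n := mul_le_mul (by omega) (by omega) (by omega) (by omega)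
    nlinarith

-- ---- sorted(pairs) = pvBlocks: permutation (by counting) and order ----

lemma pvFilterLen (c : List Int) (l : Int) :
    (c.filter (fun x => decide (x = l))).length = c.count l := by
  rw [List.count, List.countP_eq_length_filter]
  rfl

lemma pvCountMapPair (c : List Int) (j l i : Int) :
    List.count (l, i) (c.map (fun x => (x, j))) = if j = i then c.count l else 0 := by
  induction c with
  | nil => simp
  | cons x c ih =>
    simp only [List.map_cons, List.count_cons, ih, Prod.mk.injEq, beq_iff_eq, Prod.ext_iff]
    split_ifs <;> simp_all <;> omega

lemma pvCountMapPair2 (S : List Int) (lb l i : Int) :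
    List.count (l, i) (S.map (fun x => (lb, x))) = if lb = l then S.count i else 0 := by
  induction S with
  | nil => simp
  | cons x S ih =>
    simp only [List.map_cons, List.count_cons, ih, Prod.mk.injEq, beq_iff_eq, Prod.ext_iff]
    split_ifs <;> simp_all <;> omega

lemma pvSumIte (xs : List Int) (hnd : xs.Nodup) (f : Int → Nat) (l : Int) :
    ((xs.map (fun x => if x = l then f x else 0)).sum) = if l ∈ xs then f l else 0 := by
  induction xs with
  | nil => simp
  | cons x xs ih =>
    rcases List.nodup_cons.mp hnd with ⟨hx, hxs⟩
    simp only [List.map_cons, List.sum_cons, ih hxs, List.mem_cons]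
    by_cases h : x = l
    · subst h
      simp [if_neg (fun hc => hx hc)]
    · have : ¬ l = x := fun hc => h hc.symm
      simp [h, this]

lemma pvCount_socc (CL : List (List Int)) (k l i : Int) :
    (pvSocc CL k l).count i
      = ((PySem.List.enumerate CL k).map (fun p => if p.1 = i then p.2.count l else 0)).sum := by
  rw [pvSocc, List.count_flatMap]
  congr 1
  apply List.map_congr_left
  intro p _
  simp only [Function.comp]
  rw [List.map_const', List.count_replicate, ← pvFilterLen]
  by_cases h : p.1 = i
  · simp [h]
  · simp [h, fun hc : i = p.1 => h hc.symm]

lemma pvPerm (CL : List (List Int)) (M : Int)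
    (hr : ∀ c ∈ CL, ∀ x ∈ c, 1 ≤ x ∧ x ≤ M) :
    (pvBlocks CL M).Perm (pvPairs CL) := by
  rw [List.perm_iff_count]
  rintro ⟨l, i⟩
  have hcb : List.count (l, i) (pvBlocks CL M)
      = if l ∈ PySem.List.pyRange 1 (M + 1) 1 then (pvSocc CL 1 l).count i else 0 := by
    rw [pvBlocks, List.count_flatMap]
    rw [show ((PySem.List.pyRange 1 (M + 1) 1).map
        (List.count (l, i) ∘ fun l' => (pvSocc CL 1 l').map (fun i' => (l', i'))))
        = ((PySem.List.pyRange 1 (M + 1) 1).map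
          (fun l' => if l' = l then (pvSocc CL 1 l').count i else 0)) from
      List.map_congr_left (fun l' _ => by simp only [Function.comp]; exact pvCountMapPair2 _ _ _ _)]
    exact pvSumIte _ (PySem.List.nodup_pyRange_one _ _) _ _
  have hcp : List.count (l, i) (pvPairs CL)
      = ((PySem.List.enumerate CL 1).map (fun p => if p.1 = i then p.2.count l else 0)).sum := by
    rw [pvPairs, List.count_flatMap]
    congr 1
    apply List.map_congr_left
    intro p _
    simp only [Function.comp]
    exact pvCountMapPair _ _ _ _
  rw [hcb, hcp, ← pvCount_socc]
  by_cases hmem : l ∈ PySem.List.pyRange 1 (M + 1) 1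
  · rw [if_pos hmem]
  · rw [if_neg hmem]
    rw [PySem.List.mem_pyRange_one] at hmem
    symm
    rw [List.count_eq_zero]
    intro hmemS
    rcases List.mem_flatMap.mp hmemS with ⟨p, hp, hin⟩
    rcases List.mem_map.mp hin with ⟨x, hxf, _⟩
    rcases List.mem_filter.mp hxf with ⟨hxc, hxl⟩
    have hxl' : x = l := by simpa using hxl
    rcases (PySem.List.mem_enumerate_iff CL 1 p).mp hp with ⟨k, hk, rfl⟩
    have := hr _ (List.getElem_mem hk) x hxc
    omega

lemma pvSocc_lb (CL : List (List Int)) : ∀ (k l : Int), ∀ i ∈ pvSocc CL k l, k ≤ i := by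
  induction CL with
  | nil => intro k l i h; simp [pvSocc, PySem.List.enumerate_nil] at h
  | cons c cs ih =>
    intro k l i h
    simp only [pvSocc, PySem.List.enumerate_cons, List.flatMap_cons, List.mem_append] at h
    rcases h with h | h
    · rcases List.mem_map.mp h with ⟨_, _, rfl⟩
      exact le_rfl
    · have := ih (k + 1) l i h
      omega

lemma pvSocc_pairwise (CL : List (List Int)) (hnd : ∀ c ∈ CL, c.Nodup) :
    ∀ (k l : Int), (pvSocc CL k l).Pairwise (· < ·) := by
  induction CL with
  | nil => intro k l; simp [pvSocc, PySem.List.enumerate_nil]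
  | cons c cs ih =>
    intro k l
    have hflen : (c.filter (fun x => decide (x = l))).length ≤ 1 := by
      rw [pvFilterLen]
      exact List.nodup_iff_count_le_one.mp (hnd c List.mem_cons_self) l
    have hone : ((c.filter (fun x => decide (x = l))).map
        (fun _ => k)).Pairwise (· < ·) := by
      rcases hfe : c.filter (fun x => decide (x = l)) with _ | ⟨x, t⟩
      · simp
      · rcases t with _ | ⟨y, u⟩
        · simp
        · rw [hfe] at hflen; simp at hflen
    rw [pvSocc, PySem.List.enumerate_cons, List.flatMap_cons]
    apply List.pairwise_append.mpr
    refine ⟨hone, ih (fun d hd => hnd d (List.mem_cons_of_mem _ hd)) (k + 1) l, ?_⟩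
    intro x hx y hy
    rcases List.mem_map.mp hx with ⟨_, _, rfl⟩
    have := pvSocc_lb cs (k + 1) l y hy
    omega

lemma pvBlocks_pairwise (CL : List (List Int)) (M : Int) (hnd : ∀ c ∈ CL, c.Nodup) :
    (pvBlocks CL M).Pairwise pvLexLt := by
  rw [pvBlocks]
  have key : ∀ (xs : List Int), xs.Pairwise (· < ·) →
      (xs.flatMap (fun l => (pvSocc CL 1 l).map (fun i => (l, i)))).Pairwise pvLexLt := by
    intro xs
    induction xs with
    | nil => intro _; simp
    | cons l xs ih =>
      intro hpw
      rcases List.pairwise_cons.mp hpw with ⟨hhead, htail⟩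
      rw [List.flatMap_cons]
      apply List.pairwise_append.mpr
      refine ⟨?_, ih htail, ?_⟩
      · rw [List.pairwise_map]
        exact (pvSocc_pairwise CL hnd 1 l).imp (fun h => Or.inr ⟨rfl, h⟩)
      · intro p hp q hq
        rcases List.mem_map.mp hp with ⟨x, _, rfl⟩
        rcases List.mem_flatMap.mp hq with ⟨l', hl', hq'⟩
        rcases List.mem_map.mp hq' with ⟨y, _, rfl⟩
        exact Or.inl (hhead l' hl')
  exact key _ (PySem.List.pairwise_lt_pyRange_one _ _)

def pvBefore (a b : Int × Int) : Bool :=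
  decide (a.1 < b.1) || (!decide (b.1 < a.1) && decide (a.2 < b.2))

lemma pvBefore_iff (a b : Int × Int) : pvBefore a b = true ↔ pvLexLt a b := by
  simp only [pvBefore, pvLexLt, Bool.or_eq_true, Bool.and_eq_true, Bool.not_eq_eq_eq_not,
    Bool.not_true, decide_eq_true_eq, decide_eq_false_iff_not]
  omega

lemma pvLexLe_total (a b : Int × Int) (h : ¬ pvLexLt a b) : pvLexLe b a := by
  simp only [pvLexLt, not_or, not_and, not_lt] at h
  simp only [pvLexLe]
  omega

lemma pvInsert_pairwise (x : Int × Int) (ys : List (Int × Int))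
    (h : ys.Pairwise pvLexLe) :
    (PySem.List.insertBy pvBefore x ys).Pairwise pvLexLe := by
  induction ys with
  | nil => simp [PySem.List.insertBy]
  | cons y ys ih =>
    rcases List.pairwise_cons.mp h with ⟨hy, hys⟩
    rw [PySem.List.insertBy]
    by_cases hb : pvBefore x y = true
    · rw [if_pos hb]
      have hxy : pvLexLt x y := (pvBefore_iff _ _).mp hb
      apply List.pairwise_cons.mpr
      refine ⟨?_, h⟩
      intro z hz
      rcases List.mem_cons.mp hz with rfl | hz
      · simp only [pvLexLt] at hxy; simp only [pvLexLe]; omega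
      · have := hy z hz
        simp only [pvLexLt] at hxy
        simp only [pvLexLe] at this ⊢
        omega
    · rw [if_neg hb]
      have hyx : pvLexLe y x := pvLexLe_total x y (fun hc => hb ((pvBefore_iff _ _).mpr hc))
      apply List.pairwise_cons.mpr
      refine ⟨?_, ih hys⟩
      intro z hz
      rcases (PySem.List.mem_insertBy pvBefore x z ys).mp hz with rfl | hz
      · exact hyx
      · exact hy z hz

lemma pvFoldInsert_pairwise (xs : List (Int × Int)) : ∀ (acc : List (Int × Int)),
    acc.Pairwise pvLexLe →
    (xs.foldl (fun acc x => PySem.List.insertBy pvBefore x acc) acc).Pairwise pvLexLe := by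
  induction xs with
  | nil => intro acc h; exact h
  | cons x xs ih =>
    intro acc h
    rw [List.foldl_cons]
    exact ih _ (pvInsert_pairwise x acc h)

lemma pvSorted2_eq (xs ys : List (Int × Int)) (hp : ys.Perm xs)
    (hlt : ys.Pairwise pvLexLt) :
    PySem.List.sorted2 xs Prod.fst Prod.snd = ys := by
  have hunfold : PySem.List.sorted2 xs Prod.fst Prod.snd
      = xs.foldl (fun acc x => PySem.List.insertBy pvBefore x acc) [] := rfl
  have hperm : (PySem.List.sorted2 xs Prod.fst Prod.snd).Perm ys :=
    (PySem.List.sorted2_perm xs Prod.fst Prod.snd false).trans hp.symm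
  have hpw : (PySem.List.sorted2 xs Prod.fst Prod.snd).Pairwise pvLexLe := by
    rw [hunfold]
    exact pvFoldInsert_pairwise xs [] (by simp)
  have hpw2 : ys.Pairwise pvLexLe :=
    hlt.imp (fun h => by simp only [pvLexLt] at h; simp only [pvLexLe]; omega)
  exact List.Perm.eq_of_pairwise
    (fun a b _ _ hab hba => by
      simp only [pvLexLe] at hab hba
      exact Prod.ext (by omega) (by omega))
    hpw hpw2 hperm

-- ---- B's grouping scan over the sorted event list ----

lemma pvGroup_eq (pairs : List (Int × Int)) (l : Int) :
    ∀ (blk : List Int) (rest : List (Int × Int)) (k : Int) (occ : List Int),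
    0 ≤ k →
    pairs.drop k.toNat = blk.map (fun i => (l, i)) ++ rest →
    (∀ p ∈ rest, p.1 ≠ l) →
    pvGroup pairs (pairs.length : Int) l k occ = (occ ++ blk, k + blk.length) := by
  intro blk
  induction blk with
  | nil =>
    intro rest k occ hk hdrop hrest
    rw [pvGroup]
    rw [dif_neg]
    · simp
    rintro ⟨hkm, hfst⟩
    have hklen : k.toNat < pairs.length := by omega
    have hget : PySem.List.pyGetD pairs k (0, 0) = pairs[k.toNat] :=
      PySem.List.pyGetD_eq_getElem _ _ hk (by omega)
    have h0 : pairs[k.toNat + 0]? = rest[0]? := by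
      rw [← List.getElem?_drop, hdrop]
      simp
    rw [Nat.add_zero, List.getElem?_eq_getElem hklen] at h0
    have hElem : pairs[k.toNat] ∈ rest := List.mem_of_getElem? h0.symm
    exact hrest _ hElem (by rw [← hget, hfst])
  | cons i blk ih =>
    intro rest k occ hk hdrop hrest
    have hlendrop : (pairs.drop k.toNat).length = pairs.length - k.toNat := List.length_drop ..
    have hne : pairs.drop k.toNat ≠ [] := by
      rw [hdrop]; simp
    have hklen : k.toNat < pairs.length := by
      by_contra hcon
      exact hne (List.drop_eq_nil_of_le (by omega))
    have hget : PySem.List.pyGetD pairs k (0, 0) = pairs[k.toNat] :=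
      PySem.List.pyGetD_eq_getElem _ _ hk (by omega)
    have hhead : pairs[k.toNat] = (l, i) := by
      have h0 : pairs[k.toNat + 0]? = (List.map (fun i => (l, i)) (i :: blk) ++ rest)[0]? := by
        rw [← List.getElem?_drop, hdrop]
      rw [Nat.add_zero, List.getElem?_eq_getElem hklen] at h0
      simpa using h0
    rw [pvGroup, dif_pos ⟨by omega, by rw [hget, hhead]⟩]
    have hdrop' : pairs.drop (k + 1).toNat = blk.map (fun i => (l, i)) ++ rest := by
      have h1 : (k + 1).toNat = k.toNat + 1 := by omega
      rw [h1, ← List.drop_drop]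
      rw [hdrop]
      simp
    rw [ih rest (k + 1) (occ ++ [(PySem.List.pyGetD pairs k (0, 0)).2]) (by omega) hdrop' hrest]
    rw [hget, hhead]
    simp only [List.append_assoc, List.singleton_append, List.length_cons, Prod.mk.injEq]
    exact ⟨trivial, by push_cast; ring⟩

lemma pvScan_eq (CL : List (List Int)) (pairs : List (Int × Int)) :
    ∀ (ls : List Int), ls.Pairwise (· < ·) →
    ∀ (fuel : Nat) (k : Int) (LC : List (List Int)), 0 ≤ k →
    (pairs.length : Int) - k ≤ (fuel : Int) →
    pairs.drop k.toNat = ls.flatMap (fun l => (pvSocc CL 1 l).map (fun i => (l, i))) →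
    pvScan pairs (pairs.length : Int) fuel k LC
      = ls.foldl (fun LC l => if pvSocc CL 1 l = [] then LC
          else PySem.List.pySetD LC (l - 1) (pvSocc CL 1 l)) LC := by
  intro ls
  induction ls with
  | nil =>
    intro _ fuel k LC hk hfuel hdrop
    simp only [List.flatMap_nil] at hdrop
    have hlen := congrArg List.length hdrop
    rw [List.length_drop] at hlen
    simp only [List.length_nil] at hlen
    cases fuel with
    | zero => rfl
    | succ fuel =>
      rw [pvScan, if_neg (by omega)]
      rfl
  | cons l ls ih =>
    intro hpw fuel k LC hk hfuel hdrop
    rcases List.pairwise_cons.mp hpw with ⟨hhead, htail⟩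
    rw [List.flatMap_cons] at hdrop
    have hrest : ∀ p ∈ ls.flatMap (fun l' => (pvSocc CL 1 l').map (fun i => (l', i))), p.1 ≠ l := by
      intro p hp
      rcases List.mem_flatMap.mp hp with ⟨l', hl', hp'⟩
      rcases List.mem_map.mp hp' with ⟨y, _, rfl⟩
      have := hhead l' hl'
      simp
      omega
    by_cases hS : pvSocc CL 1 l = []
    · rw [hS] at hdrop
      simp only [List.map_nil, List.nil_append] at hdrop
      rw [List.foldl_cons, if_pos hS]
      exact ih htail fuel k LC hk hfuel hdrop
    · rcases hSc : pvSocc CL 1 l with _ | ⟨i0, S'⟩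
      · exact absurd hSc hS
      rw [hSc] at hdrop
      have hklen : k.toNat < pairs.length := by
        have hlen := congrArg List.length hdrop
        rw [List.length_drop] at hlen
        simp only [List.length_append, List.length_map, List.length_cons] at hlen
        omega
      have hget : PySem.List.pyGetD pairs k (0, 0) = pairs[k.toNat] :=
        PySem.List.pyGetD_eq_getElem _ _ hk (by omega)
      have hhead0 : pairs[k.toNat] = (l, i0) := by
        have h0 : pairs[k.toNat + 0]?
            = (((i0 :: S').map (fun i => (l, i))) ++
                ls.flatMap (fun l' => (pvSocc CL 1 l').map (fun i => (l', i))))[0]? := by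
          rw [← List.getElem?_drop, hdrop]
        rw [Nat.add_zero, List.getElem?_eq_getElem hklen] at h0
        simpa using h0
      have hl0 : (PySem.List.pyGetD pairs k (0, 0)).1 = l := by rw [hget, hhead0]
      have hg := pvGroup_eq pairs l (i0 :: S') _ k [] hk hdrop hrest
      cases fuel with
      | zero => omega
      | succ fuel =>
      rw [pvScan, if_pos (show k < (pairs.length : Int) by omega)]
      simp only [hl0, hg, List.nil_append]
      have hdrop2 : pairs.drop (k + (i0 :: S').length).toNat
          = ls.flatMap (fun l' => (pvSocc CL 1 l').map (fun i => (l', i))) := by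
        have h1 : (k + (i0 :: S').length).toNat = k.toNat + (i0 :: S').length := by omega
        rw [h1, ← List.drop_drop, hdrop]
        rw [show (i0 :: S').length = ((i0 :: S').map (fun i => (l, i))).length by simp]
        rw [List.drop_left]
      rw [ih htail fuel (k + (i0 :: S').length) _ (by omega) (by
        simp only [List.length_cons] at *
        push_cast at hfuel ⊢
        omega) hdrop2]
      rw [List.foldl_cons, if_neg hS, hSc]

lemma pvUpdAll_length (CL : List (List Int)) (ls : List Int) :
    ∀ (LC : List (List Int)),
    (ls.foldl (fun LC l => if pvSocc CL 1 l = [] then LC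
        else PySem.List.pySetD LC (l - 1) (pvSocc CL 1 l)) LC).length = LC.length := by
  induction ls with
  | nil => intro LC; rfl
  | cons l ls ih =>
    intro LC
    rw [List.foldl_cons, ih]
    split_ifs
    · rfl
    · rw [PySem.List.length_pySetD]

lemma pvUpdAll_getD (CL : List (List Int)) (ls : List Int) :
    ∀ (LC : List (List Int)) (t : Nat), t < LC.length →
    (∀ l ∈ ls, 1 ≤ l ∧ l ≤ (LC.length : Int)) →
    (ls.foldl (fun LC l => if pvSocc CL 1 l = [] then LC
        else PySem.List.pySetD LC (l - 1) (pvSocc CL 1 l)) LC).getD t []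
      = if ((t : Int) + 1) ∈ ls ∧ pvSocc CL 1 ((t : Int) + 1) ≠ []
        then pvSocc CL 1 ((t : Int) + 1) else LC.getD t [] := by
  induction ls with
  | nil => intro LC t _ _; simp
  | cons l ls ih =>
    intro LC t ht hb
    have hlb := hb l List.mem_cons_self
    rw [List.foldl_cons]
    by_cases hS : pvSocc CL 1 l = []
    · rw [if_pos hS, ih LC t ht (fun l' hl' => hb l' (List.mem_cons_of_mem _ hl'))]
      by_cases hmem : ((t : Int) + 1) ∈ ls
      · simp [hmem]
      · by_cases hmem2 : ((t : Int) + 1) = l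
        · simp [hmem, hmem2, hS]
        · simp [hmem, hmem2]
    · rw [if_neg hS]
      have hset : (PySem.List.pySetD LC (l - 1) (pvSocc CL 1 l)).length = LC.length :=
        PySem.List.length_pySetD _ _ _
      rw [ih _ t (by rw [hset]; exact ht) (fun l' hl' => by
        rw [hset]; exact hb l' (List.mem_cons_of_mem _ hl'))]
      have hgetset : (PySem.List.pySetD LC (l - 1) (pvSocc CL 1 l)).getD t []
          = if (l - 1).toNat = t then pvSocc CL 1 l else LC.getD t [] := by
        rw [PySem.List.pySetD_of_nonneg _ _ (by omega)]
        by_cases hidx : (l - 1).toNat = t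
        · rw [if_pos hidx, List.getD_eq_getElem _ _ (by rw [List.length_set]; exact ht),
            List.getElem_set, if_pos hidx]
        · rw [if_neg hidx, List.getD_eq_getElem _ _ (by rw [List.length_set]; exact ht),
            List.getElem_set, if_neg hidx, List.getD_eq_getElem _ _ ht]
      by_cases hmem2 : ((t : Int) + 1) = l
      · have hidx : (l - 1).toNat = t := by omega
        have hSne : pvSocc CL 1 ((t : Int) + 1) ≠ [] := by rw [hmem2]; exact hS
        by_cases hmem : ((t : Int) + 1) ∈ ls
        · simp [hmem, hSne, List.mem_cons]
        · rw [if_neg (by tauto), hgetset, if_pos hidx,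
            if_pos ⟨List.mem_cons.mpr (Or.inl hmem2), hSne⟩, hmem2]
      · have hidx : (l - 1).toNat ≠ t := by omega
        rw [hgetset, if_neg hidx]
        by_cases hmem : ((t : Int) + 1) ∈ ls
        · by_cases hSne : pvSocc CL 1 ((t : Int) + 1) = []
          · rw [if_neg (by tauto), if_neg (by tauto)]
          · rw [if_pos ⟨hmem, hSne⟩, if_pos ⟨List.mem_cons.mpr (Or.inr hmem), hSne⟩]
        · rw [if_neg (by tauto), if_neg (by
            rw [List.mem_cons]
            tauto)]

lemma pvScan_repl (CL : List (List Int)) (M : Int) (hM : 0 ≤ M)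
    (hr : ∀ c ∈ CL, ∀ x ∈ c, 1 ≤ x ∧ x ≤ M) :
    pvScan (pvBlocks CL M) ((pvBlocks CL M).length : Int) (pvBlocks CL M).length 0
        (List.replicate M.toNat [])
      = (PySem.List.pyRange 1 (M + 1) 1).map (fun l => pvSocc CL 1 l) := by
  rw [pvScan_eq CL (pvBlocks CL M) (PySem.List.pyRange 1 (M + 1) 1)
    (PySem.List.pairwise_lt_pyRange_one _ _) (pvBlocks CL M).length 0 _ le_rfl
    (by omega) (by rfl)]
  have hb : ∀ l ∈ PySem.List.pyRange 1 (M + 1) 1,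
      1 ≤ l ∧ l ≤ ((List.replicate M.toNat ([] : List Int)).length : Int) := by
    intro l hl
    rw [PySem.List.mem_pyRange_one] at hl
    rw [List.length_replicate]
    omega
  apply List.ext_getElem
  · rw [pvUpdAll_length, List.length_replicate, List.length_map,
      PySem.List.length_pyRange_one]
    omega
  intro t h1 h2
  have ht : t < M.toNat := by
    rw [pvUpdAll_length, List.length_replicate] at h1
    exact h1
  rw [← List.getD_eq_getElem _ [] h1,
    pvUpdAll_getD CL _ _ t (by rwa [List.length_replicate]) hb]
  rw [List.getElem_map, PySem.List.getElem_pyRange_one]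
  have hmem : ((t : Int) + 1) ∈ PySem.List.pyRange 1 (M + 1) 1 := by
    rw [PySem.List.mem_pyRange_one]
    omega
  by_cases hS : pvSocc CL 1 ((t : Int) + 1) = []
  · rw [if_neg (by tauto)]
    rw [List.getD_eq_getElem _ [] (by rwa [List.length_replicate]), List.getElem_replicate]
    rw [show (1 : Int) + (t : Int) = (t : Int) + 1 by ring, hS]
  · rw [if_pos ⟨hmem, hS⟩, show (1 : Int) + (t : Int) = (t : Int) + 1 by ring]

lemma pvM_nonneg (n : Int) : 0 ≤ 2 * n * (n + 1) := by
  nlinarith [mul_self_nonneg (2 * n + 1)]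

-- ===== VERDICT (by name: the statement is the Claim_ definition above) =====
theorem gen_pigeons_spec : Claim_equal_gen_pigeons := by
  intro n _ _
  unfold Spec_gen_pigeons
  rw [pvA_eq, pvCLa_eq]
  have hsorted : PySem.List.sorted2 (pvPairs (pvCL n)) Prod.fst Prod.snd
      = pvBlocks (pvCL n) (2 * n * (n + 1)) :=
    pvSorted2_eq _ _ (pvPerm _ _ (pvCL_lit n)) (pvBlocks_pairwise _ _ (pvCL_nodup n))
  have halt : gen_pigeons_alt n
      = (pvCL n, (PySem.List.pyRange 1 (2 * n * (n + 1) + 1) 1).map (fun l => pvSocc (pvCL n) 1 l)) := by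
    have hpairs : ((PySem.List.enumerate (pvCL n) 1).flatMap (fun p => p.2.map (fun l => (l, p.1))))
        = pvPairs (pvCL n) := rfl
    simp only [gen_pigeons_alt, hpairs, hsorted]
    rw [pvScan_repl (pvCL n) (2 * n * (n + 1)) (pvM_nonneg n) (pvCL_lit n)]
  rw [halt, pvApp_repl (pvCL n) (2 * n * (n + 1)) (pvM_nonneg n) (pvCL_lit n)]
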